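/- GENERATED by tools/from_farm_form.py from prooffarm-gif/accepted/_start/Lemmas.lean (a worked proof of the farm's unit `_start`,
   accepted by the verdict) — do not edit. -/
import Gif.Spec.Units.start
/-
  Pure facts for the unit `_start`: the image's constants in a memory that agrees with the start memory on the image's data, and
  `prog_main`'s precondition at the stub's call from what is known there (`ProgX.Base.Top.MainPre` AND the constants).
-/

open X86 X86.User Asan ProgX.Base

namespace Gif.Spec.start

/-- **The image's constants in a memory that agrees on the image's data**: the three tables lie at `[141300H, 14139AH)`, inside
`[100000H, 700000H)`. (The `EqOn` form of `Consts.sameExcept`.) -/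
theorem stub_consts_eqOn {mem mem' : Mem} (h : Gif.Spec.Consts mem) (he : Mem.EqOn 0x100000 0x700000 mem mem') :
    Gif.Spec.Consts mem' := by
  obtain ⟨k1, k2, k3⟩ := h
  refine ⟨?_, ?_, ?_⟩
  · intro k hk12
    rw [he.rd (0x141380 + 2 * k) 2 (by omega) (by omega) (by omega)]
    exact k1 k hk12
  · rw [he.rd 0x141340 4 (by omega) (by omega) (by omega), he.rd 0x141344 4 (by omega) (by omega) (by omega),
      he.rd 0x141348 4 (by omega) (by omega) (by omega), he.rd 0x14134c 4 (by omega) (by omega) (by omega)]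
    exact k2
  · rw [he.rd 0x141300 4 (by omega) (by omega) (by omega), he.rd 0x141304 4 (by omega) (by omega) (by omega),
      he.rd 0x141308 4 (by omega) (by omega) (by omega), he.rd 0x14130c 4 (by omega) (by omega) (by omega)]
    exact k3

/-- **The image's four constants are registered globals** of the object list `prog_main` is entered with: each is a member of
`Gif.Globals.objs`, the first half of the list. -/
theorem stub_globalsIn (len : Nat) : Gif.Spec.GlobalsIn (Gif.Globals.objs ++ initialObjs len) := by
  refine ⟨?_, ?_, ?_, ?_⟩
  · exact List.mem_append_left _ (by decide)
  · exact List.mem_append_left _ (by decide)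
  · exact List.mem_append_left _ (by decide)
  · exact List.mem_append_left _ (by decide)

/-- **`prog_main`'s precondition at the stub's call** (0x100035), from what the generic stub gives of that state (`Top.MainPre`)
and the image's constants in its memory: the heap's common precondition for the empty heap (`Top.mainPre_heapPre`); the four
constants registered; the input is IN (`len` bytes at 200000H); the output has 64 live bytes at 400000H (`cap` = 300000H). -/
theorem stub_main_pre (len : Nat) (v : State) (h : Top.MainPre Gif.Globals.objs len v) (hc : Gif.Spec.Consts v.mem) :
    (Gif.Spec.prog_main.spec (Heap.empty 0x800000 0xC00000) (Gif.Globals.objs ++ initialObjs len) []).pre v := by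
  have e_rsi := h.rsi_toNat
  refine ⟨Top.mainPre_heapPre h, stub_globalsIn len, hc, ?_, ?_⟩
  · -- the input: `len` bytes at 200000H
    intro _
    right
    rw [e_rsi, h.rdi]
    exact Top.mainPre_live_in _ len
  · -- the output: 64 bytes at 400000H
    intro _ _
    rw [h.rdx]
    exact Top.mainPre_live_out _ len 0x400000 64 (by decide) (by decide)

end Gif.Spec.start
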